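-- pv_equiv track=rewrite | github.com/ChoiSuhyeonA/infoSec | rsa_2.py | getBlocksFromText
-- ===== SOURCE A (Python) =====
-- DEFAULT_BLOCK_SIZE = 1  # message length (bytes)
--
-- BYTE_SIZE = 256  # One byte has 256 different values.
--
-- def getBlocksFromText(message, blockSize=DEFAULT_BLOCK_SIZE):
--     # Converts a string message to a list of block integers. Each integer
--     # represents blockSize (or whatever blockSize is set to) string characters.
--     messageBytes = message.encode('ascii') # convert the string to bytes
--
--     blockInts = []
--     for blockStart in range(0, len(messageBytes), blockSize):
--         # Calculate the block integer for this block of text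
--         blockInt = 0
--         for i in range(blockStart, min(blockStart + blockSize, len(messageBytes))):
--             blockInt += messageBytes[i] * (BYTE_SIZE ** (i % blockSize))
--         blockInts.append(blockInt)
--     return blockInts
-- ===== SOURCE B (Python) =====
-- DEFAULT_BLOCK_SIZE = 1
--
-- def getBlocksFromText(message, blockSize=DEFAULT_BLOCK_SIZE):
--     # Each block is just the little-endian integer of its byte slice.
--     messageBytes = message.encode('ascii')
--     return [int.from_bytes(messageBytes[blockStart:blockStart + blockSize], 'little')
--             for blockStart in range(0, len(messageBytes), blockSize)]
-- ===== Notes on version B (the rewrite author's own statement) =====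
-- stated objective: idiomatic
-- what changed: The inner power-weighted accumulation loop is replaced by taking the block's byte slice and interpreting it directly as a little-endian integer (int.from_bytes), turning the function into a single comprehension.
import Mathlib
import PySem

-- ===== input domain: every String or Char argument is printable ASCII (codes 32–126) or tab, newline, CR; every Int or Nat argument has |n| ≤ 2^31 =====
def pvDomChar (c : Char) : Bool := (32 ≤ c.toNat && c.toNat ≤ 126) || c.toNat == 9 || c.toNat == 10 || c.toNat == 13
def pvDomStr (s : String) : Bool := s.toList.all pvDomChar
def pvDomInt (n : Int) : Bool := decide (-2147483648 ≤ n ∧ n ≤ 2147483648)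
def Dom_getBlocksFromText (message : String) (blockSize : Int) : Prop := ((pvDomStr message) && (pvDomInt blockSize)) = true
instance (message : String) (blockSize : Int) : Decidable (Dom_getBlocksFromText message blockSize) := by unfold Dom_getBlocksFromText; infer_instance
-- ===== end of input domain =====

-- B replaces A's inner power-weighted summation loop by interpreting each block's
-- byte slice directly as a little-endian integer (one comprehension); objective: idiomatic.

-- ===== PORT A =====
-- message.encode('ascii'): byte values of the characters (Dom guarantees ASCII)
def pvBytes (message : String) : List Int := message.toList.map (fun c => (c.toNat : Int))

def getBlocksFromText (message : String) (blockSize : Int) : List Int :=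
  let messageBytes := pvBytes message
  (PySem.List.pyRange 0 (messageBytes.length : Int) blockSize).foldl
    (fun blockInts blockStart =>
      let blockInt :=
        (PySem.List.pyRange blockStart (min (blockStart + blockSize) (messageBytes.length : Int)) 1).foldl
          (fun acc i => acc + PySem.List.pyGetD messageBytes i 0 * 256 ^ (PySem.Int.mod i blockSize).toNat) 0
      blockInts ++ [blockInt]) []

-- ===== PORT B =====
-- int.from_bytes(block, 'little')
def pvFromBytesLE : List Int → Int
  | [] => 0
  | b :: rest => b + 256 * pvFromBytesLE rest

def getBlocksFromText_alt (message : String) (blockSize : Int) : List Int :=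
  let messageBytes := pvBytes message
  (PySem.List.pyRange 0 (messageBytes.length : Int) blockSize).map
    (fun blockStart =>
      pvFromBytesLE (PySem.List.slice messageBytes (some blockStart) (some (blockStart + blockSize))))

-- ===== PRECONDITION & SPEC =====
-- Pre_ excludes only blockSize = 0, on which A's range(0, n, 0) raises ValueError.
def Pre_getBlocksFromText (message : String) (blockSize : Int) : Prop := blockSize ≠ 0
instance (message : String) (blockSize : Int) : Decidable (Pre_getBlocksFromText message blockSize) := by unfold Pre_getBlocksFromText; infer_instance
def pvWitness_getBlocksFromText : String × Int := ("Hello!", 2)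

def Spec_getBlocksFromText (message : String) (blockSize : Int) (out : List Int) : Prop := out = getBlocksFromText_alt message blockSize
instance (message : String) (blockSize : Int) (out : List Int) : Decidable (Spec_getBlocksFromText message blockSize out) := by unfold Spec_getBlocksFromText; infer_instance

-- ===== CLAIM (what is proved, stated in full; the proofs are below) =====
def Claim_equal_getBlocksFromText : Prop := ∀ (message : String) (blockSize : Int), Dom_getBlocksFromText message blockSize → Pre_getBlocksFromText message blockSize → Spec_getBlocksFromText message blockSize (getBlocksFromText message blockSize)

-- ===== LEMMAS AND PROOFS =====

-- range with a negative step and start ≤ stop is empty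
lemma pyRange_neg_eq_nil {a b s : Int} (hs : s < 0) (hab : a ≤ b) :
    PySem.List.pyRange a b s = [] := by
  simp only [PySem.List.pyRange, if_neg (show ¬ s = 0 by omega), if_neg (show ¬ 0 < s by omega),
    if_neg (show ¬ b < a by omega)]
  simp

-- A's inner loop over one block equals the little-endian value of the slice,
-- generalized over the position j within the block and the accumulator.
lemma inner_loop_eq (B : List Int) (s bs : Int) (hs : 0 < s) (hbs : 0 ≤ bs)
    (hdvd : s ∣ bs) :
    ∀ (m j : Nat), (j : Int) + m = s → ∀ (init : Int),
      (PySem.List.pyRange (bs + j) (min (bs + s) (B.length : Int)) 1).foldl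
        (fun acc i => acc + PySem.List.pyGetD B i 0 * 256 ^ (PySem.Int.mod i s).toNat) init
      = init + 256 ^ j * pvFromBytesLE ((B.drop (bs.toNat + j)).take m) := by
  intro m
  induction m with
  | zero =>
    intro j hj init
    rw [PySem.List.pyRange_one_eq_nil (by omega : min (bs + s) (B.length : Int) ≤ bs + j)]
    simp [pvFromBytesLE]
  | succ m ih =>
    intro j hj init
    by_cases h : bs + (j : Int) < min (bs + s) (B.length : Int)
    · have hlen : bs.toNat + j < B.length := by omega
      rw [PySem.List.pyRange_one_cons h]
      simp only [List.foldl_cons]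
      have hmod : PySem.Int.mod (bs + (j : Int)) s = (j : Int) := by
        obtain ⟨q, hq⟩ := hdvd
        rw [PySem.Int.mod_eq_emod_of_pos hs, hq]
        rw [show s * q + (j : Int) = (j : Int) + s * q by ring, Int.add_mul_emod_self_left]
        exact Int.emod_eq_of_lt (by omega) (by omega)
      have hget : PySem.List.pyGetD B (bs + (j : Int)) 0 = B[bs.toNat + j]'hlen := by
        rw [PySem.List.pyGetD_eq_getElem B 0 (by omega) (by omega)]
        congr 1
        omega
      rw [hmod, hget]
      have hdrop : B.drop (bs.toNat + j) = B[bs.toNat + j]'hlen :: B.drop (bs.toNat + j + 1) :=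
        List.drop_eq_getElem_cons hlen
      rw [hdrop, List.take_succ_cons]
      have := ih (j + 1) (by push_cast; omega) (init + B[bs.toNat + j]'hlen * 256 ^ (j : Int).toNat)
      rw [show bs + (j : Int) + 1 = bs + ((j + 1 : Nat) : Int) by push_cast; ring] at *
      rw [this]
      have hjt : ((j : Int)).toNat = j := by omega
      rw [hjt, show bs.toNat + (j + 1) = bs.toNat + j + 1 by omega]
      simp [pvFromBytesLE, pow_succ]
      ring
    · rw [PySem.List.pyRange_one_eq_nil (by omega)]
      have : B.drop (bs.toNat + j) = [] := List.drop_eq_nil_of_le (by omega)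
      simp [this, pvFromBytesLE]

-- ===== VERDICT (by name: the statement is the Claim_ definition above) =====
theorem getBlocksFromText_spec : Claim_equal_getBlocksFromText := by
  intro message blockSize _hdom hpre
  unfold Spec_getBlocksFromText getBlocksFromText getBlocksFromText_alt
  simp only []
  set B := pvBytes message with hB
  rcases lt_or_gt_of_ne hpre with hneg | hpos
  · rw [pyRange_neg_eq_nil hneg (by positivity)]
    simp
  · rw [PySem.List.foldl_append_singleton_eq_map, List.nil_append]
    apply List.map_congr_left
    intro bs hmem
    rw [PySem.List.mem_pyRange_iff_of_pos hpos] at hmem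
    obtain ⟨h0, hlt, hdvd⟩ := hmem
    rw [sub_zero] at hdvd
    have := inner_loop_eq B blockSize bs hpos h0 hdvd blockSize.toNat 0 (by omega) 0
    simp only [Nat.cast_zero, add_zero, pow_zero, one_mul, zero_add] at this
    rw [this]
    congr 1
    rw [PySem.List.slice_toNat B h0 (by omega)]
    congr 1
    omega
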